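-- pv_equiv track=rewrite | github.com/yoxiko/xikomap | detectors/technology_detector.py | _get_tech_category
-- ===== SOURCE A (Python) =====
-- def _get_tech_category(tech_name: str) -> str:
--     categories = {
--         'Frontend Frameworks': ['React', 'Vue.js', 'Angular', 'jQuery', 'Bootstrap'],
--         'Backend Frameworks': ['Express.js', 'Django', 'Flask', 'Laravel', 'Ruby on Rails', 'ASP.NET'],
--         'Web Servers': ['Apache', 'Nginx', 'IIS', 'Caddy', 'LiteSpeed'],
--         'Programming Languages': ['PHP', 'Python', 'Node.js', 'Java', 'Go', 'Ruby'],
--         'Databases': ['MySQL', 'PostgreSQL', 'MongoDB', 'Redis', 'SQLite'],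
--         'CMS': ['WordPress', 'Joomla', 'Drupal', 'Magento', 'Shopify'],
--         'E-commerce': ['PrestaShop', 'OpenCart', 'BigCommerce', 'WooCommerce'],
--         'Analytics': ['Google Analytics', 'Google Tag Manager', 'Yandex.Metrica'],
--         'CDN': ['CloudFlare', 'Akamai', 'Fastly'],
--         'Security': ['Wordfence', 'Cloudflare WAF', 'Sucuri'],
--         'DevOps': ['Docker', 'Kubernetes', 'Jenkins', 'GitLab', 'GitHub'],
--     }
--
--     for category, tech_list in categories.items():
--         if tech_name in tech_list:
--             return category
--
--     return 'Other'
-- ===== SOURCE B (Python) =====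
-- # The table is stored compactly as ("Category", "name|name|...") rows; a flat
-- # name->category dict is built once at import time, so each call is one lookup.
-- _TABLE = [
--     ('Frontend Frameworks', 'React|Vue.js|Angular|jQuery|Bootstrap'),
--     ('Backend Frameworks', 'Express.js|Django|Flask|Laravel|Ruby on Rails|ASP.NET'),
--     ('Web Servers', 'Apache|Nginx|IIS|Caddy|LiteSpeed'),
--     ('Programming Languages', 'PHP|Python|Node.js|Java|Go|Ruby'),
--     ('Databases', 'MySQL|PostgreSQL|MongoDB|Redis|SQLite'),
--     ('CMS', 'WordPress|Joomla|Drupal|Magento|Shopify'),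
--     ('E-commerce', 'PrestaShop|OpenCart|BigCommerce|WooCommerce'),
--     ('Analytics', 'Google Analytics|Google Tag Manager|Yandex.Metrica'),
--     ('CDN', 'CloudFlare|Akamai|Fastly'),
--     ('Security', 'Wordfence|Cloudflare WAF|Sucuri'),
--     ('DevOps', 'Docker|Kubernetes|Jenkins|GitLab|GitHub'),
-- ]
--
-- _TECH_TO_CATEGORY = {t: c for c, packed in _TABLE for t in packed.split('|')}
--
--
-- def _get_tech_category(tech_name: str) -> str:
--     return _TECH_TO_CATEGORY.get(tech_name, 'Other')
-- ===== Notes on version B (the rewrite author's own statement) =====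
-- stated objective: idiomatic
-- what changed: B keeps the table as delimiter-packed category rows and inverts it once at import time into a flat name-to-category dict, so the per-call loop over categories with a list membership scan collapses to a single dict lookup falling back to the same default category.
import Mathlib
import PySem

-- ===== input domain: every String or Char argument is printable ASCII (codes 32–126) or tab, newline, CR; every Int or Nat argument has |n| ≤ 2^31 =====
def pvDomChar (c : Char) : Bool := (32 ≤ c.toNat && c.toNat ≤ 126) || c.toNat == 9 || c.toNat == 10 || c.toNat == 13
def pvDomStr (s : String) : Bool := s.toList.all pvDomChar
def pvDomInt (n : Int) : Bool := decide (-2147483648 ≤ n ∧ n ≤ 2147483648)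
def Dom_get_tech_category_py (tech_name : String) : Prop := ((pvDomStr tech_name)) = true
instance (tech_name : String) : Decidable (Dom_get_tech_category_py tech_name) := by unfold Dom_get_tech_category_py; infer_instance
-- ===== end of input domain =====

-- B packs each category's names into one delimited string and inverts the table once
-- into a flat name→category dict, so each call is a single lookup instead of A's scan.


-- ===== PORT A =====
-- A's dict literal `categories` (iterated in insertion order via .items())
def pvCategoriesA : List (String × List String) :=
  [("Frontend Frameworks", ["React", "Vue.js", "Angular", "jQuery", "Bootstrap"]),
   ("Backend Frameworks", ["Express.js", "Django", "Flask", "Laravel", "Ruby on Rails", "ASP.NET"]),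
   ("Web Servers", ["Apache", "Nginx", "IIS", "Caddy", "LiteSpeed"]),
   ("Programming Languages", ["PHP", "Python", "Node.js", "Java", "Go", "Ruby"]),
   ("Databases", ["MySQL", "PostgreSQL", "MongoDB", "Redis", "SQLite"]),
   ("CMS", ["WordPress", "Joomla", "Drupal", "Magento", "Shopify"]),
   ("E-commerce", ["PrestaShop", "OpenCart", "BigCommerce", "WooCommerce"]),
   ("Analytics", ["Google Analytics", "Google Tag Manager", "Yandex.Metrica"]),
   ("CDN", ["CloudFlare", "Akamai", "Fastly"]),
   ("Security", ["Wordfence", "Cloudflare WAF", "Sucuri"]),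
   ("DevOps", ["Docker", "Kubernetes", "Jenkins", "GitLab", "GitHub"])]

-- the `for category, tech_list in categories.items(): if tech_name in tech_list: return category` loop
def pvScanA (tech_name : String) : List (String × List String) → String
  | [] => "Other"
  | (category, tech_list) :: rest =>
      if tech_name ∈ tech_list then category else pvScanA tech_name rest

def get_tech_category_py (tech_name : String) : String :=
  pvScanA tech_name pvCategoriesA

-- ===== PORT B =====
-- Source B's _TABLE: delimiter-packed rows
def pvTable : List (String × String) :=
  [("Frontend Frameworks", "React|Vue.js|Angular|jQuery|Bootstrap"),
   ("Backend Frameworks", "Express.js|Django|Flask|Laravel|Ruby on Rails|ASP.NET"),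
   ("Web Servers", "Apache|Nginx|IIS|Caddy|LiteSpeed"),
   ("Programming Languages", "PHP|Python|Node.js|Java|Go|Ruby"),
   ("Databases", "MySQL|PostgreSQL|MongoDB|Redis|SQLite"),
   ("CMS", "WordPress|Joomla|Drupal|Magento|Shopify"),
   ("E-commerce", "PrestaShop|OpenCart|BigCommerce|WooCommerce"),
   ("Analytics", "Google Analytics|Google Tag Manager|Yandex.Metrica"),
   ("CDN", "CloudFlare|Akamai|Fastly"),
   ("Security", "Wordfence|Cloudflare WAF|Sucuri"),
   ("DevOps", "Docker|Kubernetes|Jenkins|GitLab|GitHub")]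

-- Source B's `_TECH_TO_CATEGORY = {t: c for c, packed in _TABLE for t in packed.split('|')}`
def pvTechToCategory : PySem.Dict String String :=
  PySem.Dict.ofList
    (pvTable.flatMap (fun row => ((PySem.Chars.splitOn row.2.toList "|".toList).map String.ofList).map (fun t => (t, row.1))))

def get_tech_category_py_alt (tech_name : String) : String :=
  pvTechToCategory.getD tech_name "Other"

-- ===== PRECONDITION & SPEC =====
def Spec_get_tech_category_py (tech_name : String) (out : String) : Prop := out = get_tech_category_py_alt tech_name
instance (tech_name : String) (out : String) : Decidable (Spec_get_tech_category_py tech_name out) := by unfold Spec_get_tech_category_py; infer_instance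

-- ===== CLAIM =====
def Claim_equal_get_tech_category_py : Prop := ∀ (tech_name : String), Dom_get_tech_category_py tech_name → Spec_get_tech_category_py tech_name (get_tech_category_py tech_name)

-- ===== LEMMAS AND PROOFS =====

-- first match in a constant-valued block of the flat list = membership in the block
lemma find_map_block (s c : String) : ∀ ts : List String,
    List.find? (fun p => p.1 == s) (ts.map (fun t => (t, c)))
      = if s ∈ ts then some (s, c) else none := by
  intro ts
  induction ts with
  | nil => simp
  | cons t ts ih =>
      by_cases h : t = s
      · subst h; simp
      · simp [beq_iff_eq, h, ih, Ne.symm h]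

-- A's scan over the category table = first-match lookup in the flattened pair list
lemma scan_eq_flat (s : String) : ∀ cats : List (String × List String),
    pvScanA s cats
      = (Option.map (fun x => x.2)
          (List.find? (fun p => p.1 == s)
            (cats.flatMap (fun p => p.2.map (fun t => (t, p.1)))))).getD "Other" := by
  intro cats
  induction cats with
  | nil => simp [pvScanA]
  | cons p rest ih =>
      obtain ⟨c, ts⟩ := p
      rw [List.flatMap_cons, List.find?_append, find_map_block]
      by_cases h : s ∈ ts
      · simp [pvScanA, h]
      · simp only [pvScanA, h, ite_false, Option.none_or]
        exact ih

set_option maxRecDepth 100000 in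
-- B's packed rows, split and inverted, yield exactly the flattening of A's table,
-- and the comprehension's keys are distinct so `ofList` keeps the pair list as is
lemma techToCategory_items :
    pvTechToCategory
      = ⟨pvCategoriesA.flatMap (fun p => p.2.map (fun t => (t, p.1)))⟩ := by
  decide

-- ===== VERDICT =====
theorem get_tech_category_py_spec : Claim_equal_get_tech_category_py := by
  intro s _
  show pvScanA s pvCategoriesA = get_tech_category_py_alt s
  rw [scan_eq_flat]
  simp [get_tech_category_py_alt, techToCategory_items, PySem.Dict.getD, PySem.Dict.get?]
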